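-- pv_equiv track=rewrite | github.com/Yaseen549/pygrams | pygrams/haselements.py | has_symbol
-- ===== SOURCE A (Python) =====
-- def has_symbol(container):
--     """
--     Checks if the container contains any special symbol (e.g., @, #, $, etc.).
--
--     Parameters:
--     ----------
--     container : str or list of str
--         A string or list of characters to check for special symbols.
--
--     Returns:
--     -------
--     bool
--         True if any special symbol exists, False otherwise.
--
--     Raises:
--     ------
--     TypeError
--         If the input is not a string or a list of characters.
--
--     Examples:
--     --------
--     >>> has_symbol("Hello@world")
--     True
--
--     >>> has_symbol("Hello world")
--     False
--     """
--     # Check input type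
--     if not isinstance(container, (str, list)):
--         raise TypeError("Input must be a string or a list of characters.")
--
--     symbols = ["@", "#", "$", "%", "^", "&", "*", "(", ")", "<", ">", "?", "/", "\\", "|", "}", "{", "~", ":", "'", "\""]
--     for symbol in symbols:
--         if symbol in container:
--             return True
--     return False
-- ===== SOURCE B (Python) =====
-- def has_symbol(container):
--     if not isinstance(container, (str, list)):
--         raise TypeError("Input must be a string or a list of characters.")
--     symbols = {"@", "#", "$", "%", "^", "&", "*", "(", ")", "<", ">", "?", "/", "\\", "|", "}", "{", "~", ":", "'", "\""}
--     return any(ch in symbols for ch in container)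
-- ===== Notes on version B (the rewrite author's own statement) =====
-- stated objective: simpler
-- what changed: Instead of scanning the whole container once per symbol (21 substring scans), B makes a single pass over the container's characters testing each against a set of symbols.
import Mathlib
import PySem

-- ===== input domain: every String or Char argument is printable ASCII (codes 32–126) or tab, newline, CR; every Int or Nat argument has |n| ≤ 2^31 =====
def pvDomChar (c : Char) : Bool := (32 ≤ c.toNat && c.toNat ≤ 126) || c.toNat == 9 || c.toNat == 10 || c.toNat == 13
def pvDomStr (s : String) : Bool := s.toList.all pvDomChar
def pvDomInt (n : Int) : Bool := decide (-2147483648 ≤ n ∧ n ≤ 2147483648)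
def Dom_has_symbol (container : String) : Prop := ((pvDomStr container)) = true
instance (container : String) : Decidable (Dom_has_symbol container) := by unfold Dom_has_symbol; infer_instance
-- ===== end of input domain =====

-- B makes one pass over the container's characters against a symbol set instead of one substring scan per symbol.

-- ===== PORT A =====
-- the literal symbol list of A, in order
def pvSymbolsA : List String :=
  ["@", "#", "$", "%", "^", "&", "*", "(", ")", "<", ">", "?", "/", "\\", "|", "}", "{", "~", ":", "'", "\""]

-- 'for symbol in symbols: if symbol in container: return True' / 'return False'
def pvSymLoop : List String → String → Bool
  | [], _ => false
  | s :: rest, c => if PySem.Str.isIn s c then true else pvSymLoop rest c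

def has_symbol (container : String) : Bool := pvSymLoop pvSymbolsA container

-- ===== PORT B =====
-- symbols = {...} : a set of the 21 single characters
def pvSymbolSet : PySem.Set Char :=
  PySem.Set.ofList ['@', '#', '$', '%', '^', '&', '*', '(', ')', '<', '>', '?', '/', '\\', '|', '}', '{', '~', ':', '\'', '"']

-- any(ch in symbols for ch in container)
def has_symbol_alt (container : String) : Bool :=
  container.toList.any (fun ch => PySem.Set.contains pvSymbolSet ch)

-- ===== PRECONDITION & SPEC =====
def Spec_has_symbol (container : String) (out : Bool) : Prop := out = has_symbol_alt container
instance (container : String) (out : Bool) : Decidable (Spec_has_symbol container out) := by unfold Spec_has_symbol; infer_instance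

-- ===== CLAIM (what is proved, stated in full; the proofs are below) =====
def Claim_equal_has_symbol : Prop := ∀ (container : String), Dom_has_symbol container → Spec_has_symbol container (has_symbol container)

-- ===== LEMMAS AND PROOFS =====

-- a one-character substring occurs iff the character is an element
theorem pv_singleton_infix {a : Char} {l : List Char} : [a] <:+: l ↔ a ∈ l := by
  constructor
  · intro h; exact h.sublist.subset (by simp)
  · intro h
    rcases List.append_of_mem h with ⟨u, v, rfl⟩
    exact ⟨u, v, by simp⟩

theorem pv_isIn_single (a : Char) (c : String) :
    PySem.Str.isIn (String.ofList [a]) c = (a ∈ c.toList : Bool) := by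
  rcases h : (a ∈ c.toList : Bool) with _ | _
  · simp only [decide_eq_false_iff_not] at h
    rw [Bool.eq_false_iff]
    intro hIn
    exact h (pv_singleton_infix.mp (by simpa using (PySem.Str.isIn_iff_infix _ _).mp hIn))
  · simp only [decide_eq_true_eq] at h
    exact (PySem.Str.isIn_iff_infix _ _).mpr (by simpa using pv_singleton_infix.mpr h)

-- ===== VERDICT (by name: the statement is the Claim_ definition above) =====
theorem has_symbol_spec : Claim_equal_has_symbol := by
  intro c _
  show has_symbol c = has_symbol_alt c
  rw [Bool.eq_iff_iff]
  simp only [has_symbol, pvSymbolsA, pvSymLoop,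
    show ("@" : String) = String.ofList ['@'] from rfl, show ("#" : String) = String.ofList ['#'] from rfl, show ("$" : String) = String.ofList ['$'] from rfl, show ("%" : String) = String.ofList ['%'] from rfl, show ("^" : String) = String.ofList ['^'] from rfl, show ("&" : String) = String.ofList ['&'] from rfl, show ("*" : String) = String.ofList ['*'] from rfl, show ("(" : String) = String.ofList ['('] from rfl, show (")" : String) = String.ofList [')'] from rfl, show ("<" : String) = String.ofList ['<'] from rfl, show (">" : String) = String.ofList ['>'] from rfl, show ("?" : String) = String.ofList ['?'] from rfl, show ("/" : String) = String.ofList ['/'] from rfl, show ("\\" : String) = String.ofList ['\\'] from rfl, show ("|" : String) = String.ofList ['|'] from rfl, show ("}" : String) = String.ofList ['}'] from rfl, show ("{" : String) = String.ofList ['{'] from rfl, show ("~" : String) = String.ofList ['~'] from rfl, show (":" : String) = String.ofList [':'] from rfl, show ("'" : String) = String.ofList ['\''] from rfl, show ("\"" : String) = String.ofList ['"'] from rfl,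
    pv_isIn_single,
    has_symbol_alt, pvSymbolSet, List.any_eq_true,
    PySem.Set.contains_iff, PySem.Set.mem_ofList, List.mem_cons, List.not_mem_nil,
    Bool.if_true_left, Bool.or_eq_true, Bool.or_false, decide_eq_true_eq, or_false]
  constructor
  · intro h
    rcases h with h|h|h|h|h|h|h|h|h|h|h|h|h|h|h|h|h|h|h|h|h <;> exact ⟨_, h, by simp⟩
  · rintro ⟨ch, hm, hc⟩
    rcases hc with rfl|rfl|rfl|rfl|rfl|rfl|rfl|rfl|rfl|rfl|rfl|rfl|rfl|rfl|rfl|rfl|rfl|rfl|rfl|rfl|rfl <;> tauto
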